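-- pv_equiv track=rewrite | github.com/Bizangel/AdventOfCode2023 | day14/day14.2.py | col_slide_down
-- ===== SOURCE A (Python) =====
-- def col_slide_down(rocks: str):
--     stacked_indexes = {}
--
--     stacked = 0
--     for i in range(len(rocks)):
--         if rocks[i] == '#':
--             stacked_indexes[i] = stacked
--             stacked = 0
--         elif rocks[i] == 'O':
--             stacked += 1
--
--     # -1 will be top layer rock so to speak
--     stacked_indexes[-1] = stacked
--
--     # reconstruct.
--     rock_locs = set(stacked_indexes.keys())
--     col_construct = []
--
--     # check stacked atop rocks
--     col_construct.extend(['O'] * stacked_indexes.get(-1, 0))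
--     i = len(rocks) - stacked_indexes.get(-1, 0) - 1
--     while i >= 0:
--         if i in rock_locs:
--             col_construct.append("#")
--             # append all stucked rocks
--             col_construct.extend(['O'] * stacked_indexes[i])
--             i -= stacked_indexes[i] + 1
--             continue
--         else:
--             col_construct.append(".")
--         i -= 1
--
--
--     return ''.join(col_construct[::-1])
-- ===== SOURCE B (Python) =====
-- def col_slide_down(rocks: str):
--     out = []
--     for seg in rocks.split('#'):
--         c = seg.count('O')
--         out.append('.' * (len(seg) - c) + 'O' * c)
--     return '#'.join(out)
-- ===== Notes on version B (the rewrite author's own statement) =====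
-- stated objective: simpler
-- what changed: Replaces the dictionary of per-wall rock counts plus the reversed index-jumping reconstruction loop with a single split on '#', a count per segment, and a join.
import Mathlib
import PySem

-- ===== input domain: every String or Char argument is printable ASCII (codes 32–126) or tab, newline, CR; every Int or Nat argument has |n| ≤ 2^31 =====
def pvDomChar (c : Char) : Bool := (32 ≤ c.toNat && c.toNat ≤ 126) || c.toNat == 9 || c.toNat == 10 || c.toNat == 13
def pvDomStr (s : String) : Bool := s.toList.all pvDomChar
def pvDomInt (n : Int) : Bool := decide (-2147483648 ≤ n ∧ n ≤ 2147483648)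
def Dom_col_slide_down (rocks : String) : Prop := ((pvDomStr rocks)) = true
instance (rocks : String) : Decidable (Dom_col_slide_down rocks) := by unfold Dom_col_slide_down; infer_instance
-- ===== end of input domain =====

-- B replaces A's dictionary of per-wall rock counts and reversed index-jumping reconstruction
-- by a split on '#', a count per segment, and a join (objective: simpler).


-- ===== PORT A =====
-- the body of A's first loop ('for i in range(len(rocks)): …'), state = (stacked_indexes, stacked)
-- (stacked is a count and stays ≥ 0, so it is carried as a Nat)
def pvStepA (st : PySem.Dict Int Nat × Nat) (p : Int × Char) : PySem.Dict Int Nat × Nat :=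
  if p.2 = '#' then (st.1.insert p.1 st.2, 0)
  else if p.2 = 'O' then (st.1, st.2 + 1)
  else st

-- A's 'while i >= 0' reconstruction loop; acc = col_construct
def pvLoopA (d : PySem.Dict Int Nat) (locs : List Int) (i : Int) (acc : List Char) : List Char :=
  if 0 ≤ i then
    if i ∈ locs then
      pvLoopA d locs (i - (d.getD i 0 : Int) - 1) (acc ++ '#' :: List.replicate (d.getD i 0) 'O')
    else
      pvLoopA d locs (i - 1) (acc ++ ['.'])
  else acc
termination_by (i + 1).toNat
decreasing_by all_goals omega

def col_slide_down (rocks : String) : String :=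
  let st := (PySem.List.enumerate rocks.toList 0).foldl pvStepA (PySem.Dict.empty, 0)
  let d2 := st.1.insert (-1) st.2            -- stacked_indexes[-1] = stacked
  let locs := PySem.Set.ofList d2.keys       -- rock_locs = set(stacked_indexes.keys())
  let col0 := List.replicate (d2.getD (-1) 0) 'O'
  String.mk (pvLoopA d2 locs ((rocks.toList.length : Int) - (d2.getD (-1) 0 : Int) - 1) col0).reverse

-- ===== PORT B =====
-- '.' * (len(seg) - seg.count('O')) + 'O' * seg.count('O')
def pvSegB (seg : List Char) : List Char :=
  List.replicate (seg.length - seg.count 'O') '.' ++ List.replicate (seg.count 'O') 'O'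

def col_slide_down_alt (rocks : String) : String :=
  String.mk (PySem.Chars.join ['#'] ((PySem.Chars.splitOn rocks.toList ['#']).map pvSegB))

-- ===== PRECONDITION & SPEC =====
def Spec_col_slide_down (rocks : String) (out : String) : Prop := out = col_slide_down_alt rocks
instance (rocks : String) (out : String) : Decidable (Spec_col_slide_down rocks out) := by unfold Spec_col_slide_down; infer_instance

-- ===== CLAIM (what is proved, stated in full; the proofs are below) =====
def Claim_equal_col_slide_down : Prop := ∀ (rocks : String), Dom_col_slide_down rocks → Spec_col_slide_down rocks (col_slide_down rocks)

-- ===== LEMMAS AND PROOFS =====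

-- A's whole computation / B's whole computation on the character list
def pvA (l : List Char) : List Char :=
  let st := (PySem.List.enumerate l 0).foldl pvStepA (PySem.Dict.empty, 0)
  let d2 := st.1.insert (-1) st.2
  (pvLoopA d2 (PySem.Set.ofList d2.keys) ((l.length : Int) - (d2.getD (-1) 0 : Int) - 1)
    (List.replicate (d2.getD (-1) 0) 'O')).reverse

def pvB (l : List Char) : List Char :=
  PySem.Chars.join ['#'] ((PySem.Chars.splitOn l ['#']).map pvSegB)

theorem pvA_eq (rocks : String) : col_slide_down rocks = String.mk (pvA rocks.toList) := rfl
theorem pvB_eq (rocks : String) : col_slide_down_alt rocks = String.mk (pvB rocks.toList) := rfl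

-- ---- phase 1 ----
theorem phase1_no_hash (s : List Char) (h : '#' ∉ s) :
    ∀ (k : Int) (d : PySem.Dict Int Nat) (n : Nat),
      (PySem.List.enumerate s k).foldl pvStepA (d, n) = (d, n + s.count 'O') := by
  induction s with
  | nil => intro k d n; simp [PySem.List.enumerate]
  | cons c s ih =>
    intro k d n
    have hc : c ≠ '#' := fun h' => h (h' ▸ List.mem_cons_self)
    have hs : '#' ∉ s := fun h' => h (List.mem_cons_of_mem _ h')
    rw [PySem.List.enumerate_cons, List.foldl_cons]
    by_cases hO : c = 'O'
    · subst hO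
      show (PySem.List.enumerate s (k+1)).foldl pvStepA (pvStepA (d, n) (k, 'O')) = _
      rw [show pvStepA (d, n) (k, 'O') = (d, n + 1) from by simp [pvStepA], ih hs]
      simp
      omega
    · show (PySem.List.enumerate s (k+1)).foldl pvStepA (pvStepA (d, n) (k, c)) = _
      simp only [pvStepA]
      rw [if_neg (by simpa using hc), if_neg (by simpa using hO)]
      rw [ih hs]
      simp [hO]

theorem phase1_keys (s : List Char) :
    ∀ (k : Int) (d : PySem.Dict Int Nat) (n : Nat),
      ∀ j ∈ ((PySem.List.enumerate s k).foldl pvStepA (d, n)).1.keys,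
        j ∈ d.keys ∨ (k ≤ j ∧ j < k + s.length) := by
  induction s with
  | nil => intro k d n j hj; simp [PySem.List.enumerate] at hj; exact Or.inl hj
  | cons c s ih =>
    intro k d n j hj
    rw [PySem.List.enumerate_cons, List.foldl_cons] at hj
    by_cases hh : c = '#'
    · subst hh
      have hj' := hj
      rw [show pvStepA (d, n) (k, '#') = (d.insert k n, 0) by simp [pvStepA]] at hj'
      rcases ih (k+1) (d.insert k n) 0 j hj' with h | h
      · rcases (PySem.Dict.mem_keys_insert d k j n).1 h with rfl | h
        · right; simp
        · exact Or.inl h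
      · right; simp at h ⊢; omega
    · have hstep : pvStepA (d, n) (k, c) = (d, if c = 'O' then n + 1 else n) := by
        simp [pvStepA, hh]; split_ifs <;> rfl
      rw [hstep] at hj
      rcases ih (k+1) d _ j hj with h | h
      · exact Or.inl h
      · right; simp at h ⊢; omega

-- ---- loop lemmas ----
theorem pvLoopA_acc (d : PySem.Dict Int Nat) (locs : List Int) :
    ∀ (fuel : Nat) (i : Int), (i + 1).toNat ≤ fuel →
      ∀ acc, pvLoopA d locs i acc = acc ++ pvLoopA d locs i [] := by
  intro fuel
  induction fuel with
  | zero =>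
    intro i hi acc
    rw [pvLoopA.eq_def]; conv_rhs => rw [pvLoopA.eq_def]
    have h0 : ¬ (0 ≤ i) := by omega
    simp [h0]
  | succ fuel ih =>
    intro i hi acc
    by_cases h0 : 0 ≤ i
    · by_cases hm : i ∈ locs
      · rw [pvLoopA.eq_def]; conv_rhs => rw [pvLoopA.eq_def]
        simp only [if_pos h0, if_pos hm]
        rw [List.nil_append,
          ih (i - (d.getD i 0 : Int) - 1) (by omega) (acc ++ ('#' :: List.replicate (d.getD i 0) 'O')),
          ih (i - (d.getD i 0 : Int) - 1) (by omega) ('#' :: List.replicate (d.getD i 0) 'O')]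
        simp
      · rw [pvLoopA.eq_def]; conv_rhs => rw [pvLoopA.eq_def]
        simp only [if_pos h0, if_neg hm]
        rw [List.nil_append, ih (i - 1) (by omega) (acc ++ ['.']), ih (i - 1) (by omega) ['.']]
        simp
    · rw [pvLoopA.eq_def]; conv_rhs => rw [pvLoopA.eq_def]
      simp [h0]

theorem pvLoopA_dots (d : PySem.Dict Int Nat) (locs : List Int) (b : Int) (hb : -1 ≤ b) :
    ∀ (n : Nat), (∀ m : Nat, 0 < m → m ≤ n → (b + m) ∉ locs) →
      ∀ acc, pvLoopA d locs (b + n) acc = pvLoopA d locs b (acc ++ List.replicate n '.') := by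
  intro n
  induction n with
  | zero => intro _ acc; simp
  | succ n ih =>
    intro h acc
    have h0 : 0 ≤ b + ((n : Int) + 1) := by omega
    have hm : (b + ((n : Nat) + 1 : Nat) : Int) ∉ locs := h (n + 1) (by omega) le_rfl
    rw [pvLoopA.eq_def]
    rw [if_pos (by push_cast; omega)]
    rw [if_neg (by push_cast at hm ⊢; exact hm)]
    have he : b + ((n : Nat) + 1 : Nat) - 1 = b + (n : Int) := by push_cast; ring
    rw [he, ih (fun m h1 h2 => h m h1 (by omega)) (acc ++ ['.'])]
    congr 1
    simp [List.replicate_succ]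

theorem pvLoopA_congr (d d' : PySem.Dict Int Nat) (locs locs' : List Int) (B : Int)
    (hmem : ∀ j : Int, 0 ≤ j → j < B → (j ∈ locs ↔ j ∈ locs'))
    (hval : ∀ j : Int, 0 ≤ j → j < B → d.getD j 0 = d'.getD j 0) :
    ∀ (fuel : Nat) (i : Int), (i + 1).toNat ≤ fuel → i < B →
      ∀ acc, pvLoopA d locs i acc = pvLoopA d' locs' i acc := by
  intro fuel
  induction fuel with
  | zero =>
    intro i hi _ acc
    rw [pvLoopA.eq_def]; conv_rhs => rw [pvLoopA.eq_def]
    have h0 : ¬ (0 ≤ i) := by omega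
    simp [h0]
  | succ fuel ih =>
    intro i hi hiB acc
    by_cases h0 : 0 ≤ i
    · have hmm := hmem i h0 hiB
      have hvv := hval i h0 hiB
      by_cases hm : i ∈ locs
      · rw [pvLoopA.eq_def]; conv_rhs => rw [pvLoopA.eq_def]
        rw [if_pos h0, if_pos h0, if_pos hm, if_pos (hmm.1 hm), ← hvv]
        exact ih _ (by omega) (by omega) _
      · rw [pvLoopA.eq_def]; conv_rhs => rw [pvLoopA.eq_def]
        rw [if_pos h0, if_pos h0, if_neg hm, if_neg (fun hc => hm (hmm.2 hc))]
        exact ih _ (by omega) (by omega) _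
    · rw [pvLoopA.eq_def]; conv_rhs => rw [pvLoopA.eq_def]
      simp [h0]

-- ---- decompositions ----
theorem last_hash (l : List Char) (h : '#' ∈ l) :
    ∃ p s, l = p ++ '#' :: s ∧ '#' ∉ s := by
  induction l using List.reverseRecOn with
  | nil => simp at h
  | append_singleton l' c ih =>
    by_cases hc : c = '#'
    · exact ⟨l', [], by simp [hc], by simp⟩
    · have h' : '#' ∈ l' := by
        rcases List.mem_append.1 h with h | h
        · exact h
        · simp at h; exact absurd h.symm hc
      obtain ⟨p, s, rfl, hs⟩ := ih h'
      exact ⟨p, s ++ [c], by simp, by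
        intro hx
        rcases List.mem_append.1 hx with hx | hx
        · exact hs hx
        · simp at hx; exact hc hx.symm⟩

theorem first_hash (l : List Char) (h : '#' ∈ l) :
    ∃ a b, l = a ++ '#' :: b ∧ '#' ∉ a := by
  induction l with
  | nil => simp at h
  | cons c t ih =>
    by_cases hc : c = '#'
    · exact ⟨[], t, by simp [hc], by simp⟩
    · have h' : '#' ∈ t := by
        rcases List.mem_cons.1 h with h | h
        · exact absurd h.symm hc
        · exact h
      obtain ⟨a, b, rfl, ha⟩ := ih h'
      exact ⟨c :: a, b, rfl, by
        intro hx
        rcases List.mem_cons.1 hx with hx | hx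
        · exact hc hx.symm
        · exact ha hx⟩

-- ---- splitOn lemmas ----
theorem go_no_hash (l : List Char) (h : '#' ∉ l) :
    ∀ (fuel : Nat), l.length ≤ fuel → ∀ cur acc,
      PySem.Chars.splitOn.go ['#'] fuel l cur acc = ((cur.reverse ++ l) :: acc).reverse := by
  induction l with
  | nil => intro fuel _ cur acc; cases fuel <;> simp [PySem.Chars.splitOn.go]
  | cons c rest ih =>
    intro fuel hf cur acc
    obtain ⟨f, rfl⟩ : ∃ f, fuel = f + 1 := ⟨fuel - 1, by simp at hf; omega⟩
    have hc : c ≠ '#' := fun h' => h (h' ▸ List.mem_cons_self)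
    have hrest : '#' ∉ rest := fun h' => h (List.mem_cons_of_mem _ h')
    rw [PySem.Chars.splitOn.go]
    rw [if_neg (by simp [List.isPrefixOf]; exact fun h' => hc h'.symm)]
    rw [ih hrest f (by simp at hf; omega)]
    simp

theorem go_acc (l : List Char) :
    ∀ (fuel : Nat), l.length ≤ fuel → ∀ cur acc,
      PySem.Chars.splitOn.go ['#'] fuel l cur acc
        = acc.reverse ++ PySem.Chars.splitOn.go ['#'] fuel l cur [] := by
  induction l with
  | nil => intro fuel _ cur acc; cases fuel <;> simp [PySem.Chars.splitOn.go]
  | cons c rest ih =>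
    intro fuel hf cur acc
    obtain ⟨f, rfl⟩ : ∃ f, fuel = f + 1 := ⟨fuel - 1, by simp at hf; omega⟩
    have hfr : rest.length ≤ f := by simp at hf; omega
    by_cases hc : c = '#'
    · subst hc
      rw [PySem.Chars.splitOn.go]; conv_rhs => rw [PySem.Chars.splitOn.go]
      rw [if_pos (by simp [List.isPrefixOf])]
      rw [if_pos (by simp [List.isPrefixOf])]
      simp only [List.length_cons, List.length_nil, List.drop_succ_cons, List.drop_zero]
      rw [ih f hfr [] (cur.reverse :: acc), ih f hfr [] [cur.reverse]]
      simp
    · rw [PySem.Chars.splitOn.go]; conv_rhs => rw [PySem.Chars.splitOn.go]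
      rw [if_neg (by simp [List.isPrefixOf]; exact fun h' => hc h'.symm)]
      rw [if_neg (by simp [List.isPrefixOf]; exact fun h' => hc h'.symm)]
      exact ih f hfr (c :: cur) acc

theorem go_pref (a : List Char) (ha : '#' ∉ a) :
    ∀ (x : List Char) (fuel : Nat), a.length + 1 + x.length ≤ fuel → ∀ cur acc,
      PySem.Chars.splitOn.go ['#'] fuel (a ++ '#' :: x) cur acc
        = PySem.Chars.splitOn.go ['#'] (fuel - a.length - 1) x [] ((cur.reverse ++ a) :: acc) := by
  induction a with
  | nil =>
    intro x fuel hf cur acc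
    obtain ⟨f, rfl⟩ : ∃ f, fuel = f + 1 := ⟨fuel - 1, by omega⟩
    rw [List.nil_append, PySem.Chars.splitOn.go]
    rw [if_pos (by simp [List.isPrefixOf])]
    simp
  | cons c a' ih =>
    intro x fuel hf cur acc
    obtain ⟨f, rfl⟩ : ∃ f, fuel = f + 1 := ⟨fuel - 1, by simp at hf; omega⟩
    have hc : c ≠ '#' := fun h' => ha (h' ▸ List.mem_cons_self)
    have ha' : '#' ∉ a' := fun h' => ha (List.mem_cons_of_mem _ h')
    rw [List.cons_append, PySem.Chars.splitOn.go]
    rw [if_neg (by simp [List.isPrefixOf]; exact fun h' => hc h'.symm)]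
    rw [ih ha' x f (by simp at hf; omega) (c :: cur) acc]
    have h1 : f + 1 - (c :: a').length - 1 = f - a'.length - 1 := by simp
    rw [h1]
    simp

theorem splitOn_no_hash (l : List Char) (h : '#' ∉ l) :
    PySem.Chars.splitOn l ['#'] = [l] := by
  rw [PySem.Chars.splitOn, go_no_hash l h (l.length + 1) (by omega)]
  simp

theorem splitOn_first (a x : List Char) (ha : '#' ∉ a) :
    PySem.Chars.splitOn (a ++ '#' :: x) ['#'] = a :: PySem.Chars.splitOn x ['#'] := by
  rw [PySem.Chars.splitOn, go_pref a ha x ((a ++ '#' :: x).length + 1) (by simp; omega)]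
  have h1 : (a ++ '#' :: x).length + 1 - a.length - 1 = x.length + 1 := by simp; omega
  rw [h1, go_acc x (x.length + 1) (by omega)]
  rw [PySem.Chars.splitOn]
  simp

theorem splitOn_last (p s : List Char) (hs : '#' ∉ s) :
    PySem.Chars.splitOn (p ++ '#' :: s) ['#'] = PySem.Chars.splitOn p ['#'] ++ [s] := by
  have aux : ∀ (n : Nat) (p : List Char), p.length ≤ n →
      PySem.Chars.splitOn (p ++ '#' :: s) ['#'] = PySem.Chars.splitOn p ['#'] ++ [s] := by
    intro n
    induction n with
    | zero =>
      intro p hp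
      have : p = [] := List.length_eq_zero_iff.1 (by omega)
      subst this
      rw [show ([] ++ '#' :: s : List Char) = [] ++ '#' :: s from rfl,
        splitOn_first [] s (by simp), splitOn_no_hash s hs, splitOn_no_hash [] (by simp)]
      rfl
    | succ n ih =>
      intro p hp
      by_cases hmem : '#' ∈ p
      · obtain ⟨a, b, rfl, ha⟩ := first_hash p hmem
        have hb : b.length ≤ n := by simp at hp; omega
        rw [List.append_assoc, List.cons_append, splitOn_first a _ ha, ih b hb,
          splitOn_first a b ha]
        rfl
      · rw [splitOn_first p s hmem, splitOn_no_hash p hmem, splitOn_no_hash s hs]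
        rfl
  exact aux p.length p le_rfl

theorem splitOn_ne_nil (l : List Char) : PySem.Chars.splitOn l ['#'] ≠ [] := by
  by_cases h : '#' ∈ l
  · obtain ⟨a, b, rfl, ha⟩ := first_hash l h
    rw [splitOn_first a b ha]
    simp
  · rw [splitOn_no_hash l h]
    simp

theorem join_append_singleton (ys : List (List Char)) (hy : ys ≠ []) (z : List Char) :
    PySem.Chars.join ['#'] (ys ++ [z]) = PySem.Chars.join ['#'] ys ++ '#' :: z := by
  induction ys with
  | nil => exact absurd rfl hy
  | cons y ys ih =>
    cases ys with
    | nil =>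
      rw [show ([y] ++ [z] : List (List Char)) = [y, z] from rfl,
        PySem.Chars.join_cons_cons, PySem.Chars.join_singleton, PySem.Chars.join_singleton]
      simp
    | cons y2 t =>
      rw [show ((y :: y2 :: t) ++ [z] : List (List Char)) = y :: ((y2 :: t) ++ [z]) from rfl]
      rw [show ((y2 :: t) ++ [z] : List (List Char)) = y2 :: (t ++ [z]) from rfl]
      rw [PySem.Chars.join_cons_cons, show (y2 :: (t ++ [z]) : List (List Char)) = (y2 :: t) ++ [z] from rfl]
      rw [ih (by simp), PySem.Chars.join_cons_cons]
      simp

-- ---- the two cases ----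
theorem pvLoopA_neg (d : PySem.Dict Int Nat) (locs : List Int) (i : Int) (hi : i < 0)
    (acc : List Char) : pvLoopA d locs i acc = acc := by
  rw [pvLoopA.eq_def, if_neg (by omega)]

theorem pvA_no_hash (l : List Char) (h : '#' ∉ l) : pvA l = pvSegB l := by
  have hcnt : l.count 'O' ≤ l.length := List.count_le_length
  have hof : PySem.Set.ofList [(-1 : Int)] = [-1] := by decide
  have hkeys : (PySem.Dict.empty.insert (-1 : Int) (l.count 'O')).keys = [-1] := by
    rw [PySem.Dict.keys_insert_of_not_contains _ _ (PySem.Dict.contains_empty _),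
      PySem.Dict.keys_empty]
    rfl
  have hgd : (PySem.Dict.empty.insert (-1 : Int) (l.count 'O')).getD (-1) 0 = l.count 'O' := by
    simp [PySem.Dict.getD, PySem.Dict.get?_insert_self]
  simp only [pvA, phase1_no_hash l h 0 PySem.Dict.empty 0, Nat.zero_add]
  rw [hkeys, hgd, hof]
  have hi : (l.length : Int) - (l.count 'O' : Int) - 1
      = -1 + ((l.length - l.count 'O' : Nat) : Int) := by omega
  rw [hi, pvLoopA_dots _ [-1] (-1) (by omega) (l.length - l.count 'O')
    (by intro m h1 _; simp; omega) _]
  rw [pvLoopA_neg _ _ _ (by omega)]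
  simp [pvSegB, List.reverse_append, List.reverse_replicate]

theorem pvB_no_hash (l : List Char) (h : '#' ∉ l) : pvB l = pvSegB l := by
  rw [pvB, splitOn_no_hash l h, List.map_cons, List.map_nil, PySem.Chars.join_singleton]

theorem pvAB (l : List Char) : pvA l = pvB l := by
  have aux : ∀ (n : Nat) (l : List Char), l.length ≤ n → pvA l = pvB l := by
    intro n
    induction n with
    | zero =>
      intro l hl
      have : l = [] := List.length_eq_zero_iff.1 (by omega)
      subst this
      rw [pvA_no_hash [] (by simp), pvB_no_hash [] (by simp)]
    | succ n ih =>
      intro l hl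
      by_cases hmem : '#' ∈ l
      · obtain ⟨p, s, rfl, hs⟩ := last_hash l hmem
        have hplen : p.length ≤ n := by simp at hl; omega
        set st := (PySem.List.enumerate p 0).foldl pvStepA (PySem.Dict.empty, 0) with hst
        set P : Int := (p.length : Int) with hP
        set cs := s.count 'O' with hcs
        set np := st.2 with hnp
        set dp := st.1 with hdp
        have hP0 : 0 ≤ P := hP ▸ Int.natCast_nonneg _
        have hphase : (PySem.List.enumerate (p ++ '#' :: s) 0).foldl pvStepA (PySem.Dict.empty, 0)
            = (dp.insert P np, cs) := by
          rw [PySem.List.enumerate_append, List.foldl_append, PySem.List.enumerate_cons,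
            List.foldl_cons, ← hst]
          rw [show pvStepA st ((0 : Int) + ↑p.length, '#') = (dp.insert ((0 : Int) + ↑p.length) np, 0) from by
            simp [pvStepA, hdp, hnp]]
          rw [phase1_no_hash s hs]
          rw [hP, hcs]
          norm_num
        have hkeysdp : ∀ j ∈ dp.keys, 0 ≤ j ∧ j < P := by
          intro j hj
          rw [hdp, hst] at hj
          rcases phase1_keys p 0 PySem.Dict.empty 0 j hj with hh | hh
          · rw [PySem.Dict.keys_empty] at hh; simp at hh
          · refine ⟨hh.1, ?_⟩
            have := hh.2
            rw [hP]
            omega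
        set d2 := (dp.insert P np).insert (-1) cs with hd2
        set d2' := dp.insert (-1) np with hd2'
        set locs := PySem.Set.ofList d2.keys with hlocs
        set locs' := PySem.Set.ofList d2'.keys with hlocs'
        have hgd1 : d2.getD (-1) 0 = cs := by
          rw [hd2]; simp [PySem.Dict.getD, PySem.Dict.get?_insert_self]
        have hgdP : d2.getD P 0 = np := by
          rw [hd2, PySem.Dict.getD,
            PySem.Dict.get?_insert_of_ne _ _ (show P ≠ -1 by omega),
            PySem.Dict.get?_insert_self]
          rfl
        have hgd1' : d2'.getD (-1) 0 = np := by
          rw [hd2']; simp [PySem.Dict.getD, PySem.Dict.get?_insert_self]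
        have hmem2 : ∀ j : Int, j ∈ locs ↔ (j = -1 ∨ j = P ∨ j ∈ dp.keys) := by
          intro j
          rw [hlocs, PySem.Set.mem_ofList, hd2]
          simp [PySem.Dict.mem_keys_insert]
        have hmem2' : ∀ j : Int, j ∈ locs' ↔ (j = -1 ∨ j ∈ dp.keys) := by
          intro j
          rw [hlocs', PySem.Set.mem_ofList, hd2']
          simp [PySem.Dict.mem_keys_insert]
        have hPmem : P ∈ locs := (hmem2 P).2 (Or.inr (Or.inl rfl))
        have hscount : cs ≤ s.length := hcs ▸ List.count_le_length
        have hmemC : ∀ j : Int, 0 ≤ j → j < P → (j ∈ locs ↔ j ∈ locs') := by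
          intro j h1 h2
          rw [hmem2 j, hmem2' j]
          constructor
          · rintro (h | h | h)
            · exact absurd h (by omega)
            · exact absurd h (by omega)
            · exact Or.inr h
          · rintro (h | h)
            · exact absurd h (by omega)
            · exact Or.inr (Or.inr h)
        have hvalC : ∀ j : Int, 0 ≤ j → j < P → d2.getD j 0 = d2'.getD j 0 := by
          intro j h1 h2
          rw [hd2, hd2', PySem.Dict.getD, PySem.Dict.getD,
            PySem.Dict.get?_insert_of_ne _ _ (show j ≠ -1 by omega),
            PySem.Dict.get?_insert_of_ne _ _ (show j ≠ P by omega),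
            PySem.Dict.get?_insert_of_ne _ _ (show j ≠ -1 by omega)]
        have hdots : ∀ m : Nat, 0 < m → m ≤ s.length - cs → (P + (m : Int)) ∉ locs := by
          intro m h1 h2 hcon
          rcases (hmem2 _).1 hcon with hh | hh | hh
          · omega
          · omega
          · have := hkeysdp _ hh; omega
        have hi0 : ((p ++ '#' :: s).length : Int) - (cs : Int) - 1
            = P + ((s.length - cs : Nat) : Int) := by
          rw [hP]
          simp
          omega
        have hLHS : pvA (p ++ '#' :: s)
            = ((List.replicate cs 'O' ++ List.replicate (s.length - cs) '.'
                ++ '#' :: List.replicate np 'O')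
               ++ pvLoopA d2' locs' (P - (np : Int) - 1) []).reverse := by
          simp only [pvA, hphase]
          rw [← hd2, ← hlocs, hgd1, hi0]
          rw [pvLoopA_dots d2 locs P (by omega) (s.length - cs) hdots _]
          rw [pvLoopA.eq_def, if_pos hP0, if_pos hPmem, hgdP]
          rw [pvLoopA_congr d2 d2' locs locs' P hmemC hvalC
            ((P - (np : Int) - 1) + 1).toNat _ le_rfl (by omega) _]
          rw [pvLoopA_acc d2' locs' ((P - (np : Int) - 1) + 1).toNat _ le_rfl _]
        have hpA : pvA p = (pvLoopA d2' locs' (P - (np : Int) - 1)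
            (List.replicate np 'O')).reverse := by
          simp only [pvA]
          rw [← hst, ← hdp, ← hnp, ← hd2', ← hlocs', hgd1', ← hP]
        have hT : pvA p = (pvLoopA d2' locs' (P - (np : Int) - 1) []).reverse
            ++ List.replicate np 'O' := by
          rw [hpA, pvLoopA_acc d2' locs' ((P - (np : Int) - 1) + 1).toNat _ le_rfl _]
          simp [List.reverse_append, List.reverse_replicate]
        have hBside : pvB (p ++ '#' :: s) = pvB p ++ '#' :: pvSegB s := by
          rw [pvB, splitOn_last p s hs, List.map_append,
            show List.map pvSegB [s] = [pvSegB s] from rfl,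
            join_append_singleton _ (fun hcon => splitOn_ne_nil p (List.map_eq_nil_iff.1 hcon)) _,
            ← pvB]
        rw [hLHS, hBside, ← ih p hplen, hT]
        simp [pvSegB, ← hcs, List.reverse_append, List.reverse_replicate, List.append_assoc]
      · rw [pvA_no_hash l hmem, pvB_no_hash l hmem]
  exact aux l.length l le_rfl

-- ===== VERDICT (by name: the statement is the Claim_ definition above) =====
theorem col_slide_down_spec : Claim_equal_col_slide_down := by
  intro rocks _
  show col_slide_down rocks = col_slide_down_alt rocks
  rw [pvA_eq, pvB_eq, pvAB]
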